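-- pv_equiv track=rewrite | github.com/chen7944/uwubot | bot.py | uwuify
-- ===== SOURCE A (Python) =====
-- def uwuify(text):
--     length = len(text)
--     output_text = ''
--     for i in range(length):
--         current_char = text[i]
--         previous_char = 'q!1u&7u&7p)0q!1e#3'
--         upper_vowels = ['A', 'E', 'I', 'O', 'U']
--         lower_vowels = ['a', 'e', 'i', 'o', 'u']
--         if i > 0:
--             previous_char = text[i - 1]
--
--         if current_char == 'L' or current_char == 'R':
--             output_text += 'W'
--
--         elif current_char == 'l' or current_char == 'r':
--             output_text += 'w'
--
--         elif current_char in upper_vowels: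
--             if previous_char == 'N' or previous_char == 'M':
--                 output_text += "Y"
--                 output_text += current_char
--             else:
--                 output_text += current_char
--
--         elif current_char in lower_vowels:
--             if previous_char == 'n' or previous_char == 'm':
--                 output_text += "y"
--                 output_text += current_char
--             else:
--                 output_text += current_char
--
--         elif current_char == 'S':
--             if previous_char == 'I':
--                 output_text += "W"
--             else:
--                 output_text += current_char
--
--         elif current_char == 's':
--             if previous_char == 'i':
--                 output_text += "w"
--             else:
--                 output_text += current_char
--
--         elif current_char == 'OVE':
--             output_text += 'UV'
--
--         elif current_char == 'ove':
--             output_text += 'uv'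
--
--         else:
--             output_text += current_char
--
--     return output_text
-- ===== SOURCE B (Python) =====
-- def uwuify(text):
--     # Multi-pass pipeline: insert Y/y before vowels after N/M via str.replace,
--     # turn IS/is into IW/iw, then map L/R/l/r with a translation table.
--     for nasal, y, vowels in (('N', 'Y', 'AEIOU'), ('M', 'Y', 'AEIOU'),
--                              ('n', 'y', 'aeiou'), ('m', 'y', 'aeiou')):
--         for v in vowels:
--             text = text.replace(nasal + v, nasal + y + v)
--     text = text.replace('IS', 'IW').replace('is', 'iw')
--     return text.translate(str.maketrans('LRlr', 'WWww'))
-- ===== Notes on version B (the rewrite author's own statement) =====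
-- stated objective: faster
-- what changed: Replaced the per-character index loop (string-concatenation accumulator, if/elif chain with a sentinel previous char, dead 'OVE' branches) by a whole-string substitution pipeline: 22 str.replace passes insert Y/y after N/M-vowel pairs and rewrite IS/is to IW/iw, then one str.translate pass maps L/R/l/r to W/W/w/w; correctness rests on no pass producing or consuming another pass's trigger pair.
import Mathlib
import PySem

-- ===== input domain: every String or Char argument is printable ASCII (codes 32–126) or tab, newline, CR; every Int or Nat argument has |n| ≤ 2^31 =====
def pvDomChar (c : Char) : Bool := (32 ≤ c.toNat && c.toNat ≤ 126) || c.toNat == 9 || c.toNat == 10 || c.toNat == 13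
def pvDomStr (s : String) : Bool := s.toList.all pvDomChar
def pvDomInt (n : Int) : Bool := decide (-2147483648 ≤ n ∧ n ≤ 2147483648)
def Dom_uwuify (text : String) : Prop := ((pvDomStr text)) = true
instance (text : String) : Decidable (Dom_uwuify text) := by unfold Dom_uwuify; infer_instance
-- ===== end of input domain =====

-- B replaces A's per-character index loop by a whole-string substitution pipeline
-- (str.replace passes + one translate pass); equivalence of return values is proved below.

-- B replaces A's per-character index loop by a whole-string substitution pipeline
-- (a constant number of str.replace passes plus one translate pass); only the return
-- value is claimed equal (A mutates nothing).

-- ===== PORT A =====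
-- A's loop body; the accumulated string is kept as a List Char (Python's output_text += s)
def uwuifyStep (text : String) (output_text : List Char) (i : Int) : List Char :=
  let current_char : String := (PySem.Str.pyGet? text i).elim "" (fun c => String.ofList [c])
  let previous_char : String :=
    if i > 0 then (PySem.Str.pyGet? text (i - 1)).elim "" (fun c => String.ofList [c])
    else "q!1u&7u&7p)0q!1e#3"
  let upper_vowels : List String := ["A", "E", "I", "O", "U"]
  let lower_vowels : List String := ["a", "e", "i", "o", "u"]
  if current_char = "L" ∨ current_char = "R" then output_text ++ ['W']
  else if current_char = "l" ∨ current_char = "r" then output_text ++ ['w']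
  else if current_char ∈ upper_vowels then
    if previous_char = "N" ∨ previous_char = "M" then output_text ++ ['Y'] ++ current_char.toList
    else output_text ++ current_char.toList
  else if current_char ∈ lower_vowels then
    if previous_char = "n" ∨ previous_char = "m" then output_text ++ ['y'] ++ current_char.toList
    else output_text ++ current_char.toList
  else if current_char = "S" then
    if previous_char = "I" then output_text ++ ['W'] else output_text ++ current_char.toList
  else if current_char = "s" then
    if previous_char = "i" then output_text ++ ['w'] else output_text ++ current_char.toList
  else if current_char = "OVE" then output_text ++ ['U', 'V']
  else if current_char = "ove" then output_text ++ ['u', 'v']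
  else output_text ++ current_char.toList

def uwuify (text : String) : String :=
  let length : Int := PySem.Str.len text
  String.ofList ((PySem.List.pyRange 0 length 1).foldl (uwuifyStep text) [])

-- ===== PORT B =====
-- str.translate with the table str.maketrans('LRlr','WWww'); ported by hand as a
-- per-char map (exact: the table maps single BMP chars to single chars)
def uwuifyTranslate (c : Char) : Char :=
  if c = 'L' then 'W' else if c = 'R' then 'W'
  else if c = 'l' then 'w' else if c = 'r' then 'w' else c

def uwuify_alt (text : String) : String :=
  let passes : List (Char × Char × List Char) :=
    [('N', 'Y', ['A', 'E', 'I', 'O', 'U']), ('M', 'Y', ['A', 'E', 'I', 'O', 'U']),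
     ('n', 'y', ['a', 'e', 'i', 'o', 'u']), ('m', 'y', ['a', 'e', 'i', 'o', 'u'])]
  let t1 : String := passes.foldl
    (fun s pass => pass.2.2.foldl
      (fun s v => PySem.Str.replace s (String.ofList [pass.1, v]) (String.ofList [pass.1, pass.2.1, v])) s)
    text
  let t2 : String := PySem.Str.replace (PySem.Str.replace t1 "IS" "IW") "is" "iw"
  String.ofList (t2.toList.map uwuifyTranslate)

-- ===== PRECONDITION & SPEC =====
def Spec_uwuify (text : String) (out : String) : Prop := out = uwuify_alt text
instance (text : String) (out : String) : Decidable (Spec_uwuify text out) := by unfold Spec_uwuify; infer_instance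

-- ===== CLAIM (what is proved, stated in full; the proofs are below) =====
def Claim_equal_uwuify : Prop := ∀ (text : String), Dom_uwuify text → Spec_uwuify text (uwuify text)

-- ===== LEMMAS AND PROOFS =====

-- A prev-carrying pairwise rewriter: emits a block for each input char, the block
-- depending on the ORIGINAL previous char (none before the first char).
def pwGo (o : Option Char → Char → List Char) : Option Char → List Char → List Char
  | _, [] => []
  | p, x :: rest => o p x ++ pwGo o (some x) rest

-- One substitution rule: on an adjacent pair (prev, cur) replace cur by out.
structure URule where
  prev : Char
  cur : Char
  out : List Char
deriving DecidableEq, Repr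

-- first-match combined block function of a rule list
def ruleOut (rs : List URule) (p : Option Char) (x : Char) : List Char :=
  match rs with
  | [] => [x]
  | r :: rest => if p = some r.prev ∧ x = r.cur then r.out else ruleOut rest p x

-- the 22 rules of B's pipeline, in pipeline order
def uwuRules : List URule :=
  [⟨'N','A',['Y','A']⟩, ⟨'N','E',['Y','E']⟩, ⟨'N','I',['Y','I']⟩, ⟨'N','O',['Y','O']⟩, ⟨'N','U',['Y','U']⟩,
   ⟨'M','A',['Y','A']⟩, ⟨'M','E',['Y','E']⟩, ⟨'M','I',['Y','I']⟩, ⟨'M','O',['Y','O']⟩, ⟨'M','U',['Y','U']⟩,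
   ⟨'n','a',['y','a']⟩, ⟨'n','e',['y','e']⟩, ⟨'n','i',['y','i']⟩, ⟨'n','o',['y','o']⟩, ⟨'n','u',['y','u']⟩,
   ⟨'m','a',['y','a']⟩, ⟨'m','e',['y','e']⟩, ⟨'m','i',['y','i']⟩, ⟨'m','o',['y','o']⟩, ⟨'m','u',['y','u']⟩,
   ⟨'I','S',['W']⟩, ⟨'i','s',['w']⟩]

def applyRules (rs : List URule) (l : List Char) : List Char :=
  rs.foldl (fun l r => PySem.Chars.replace l [r.prev, r.cur] (r.prev :: r.out)) l

-- A's step function, as a block function over (original prev, cur)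
def oA (p : Option Char) (x : Char) : List Char :=
  if x = 'L' ∨ x = 'R' then ['W']
  else if x = 'l' ∨ x = 'r' then ['w']
  else if x ∈ ['A','E','I','O','U'] then
    (if p = some 'N' ∨ p = some 'M' then ['Y', x] else [x])
  else if x ∈ ['a','e','i','o','u'] then
    (if p = some 'n' ∨ p = some 'm' then ['y', x] else [x])
  else if x = 'S' then (if p = some 'I' then ['W'] else [x])
  else if x = 's' then (if p = some 'i' then ['w'] else [x])
  else [x]

theorem ruleOut_cons (r : URule) (rs : List URule) (p : Option Char) (x : Char) :
    ruleOut (r :: rs) p x = if p = some r.prev ∧ x = r.cur then r.out else ruleOut rs p x := rfl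

theorem pwGo_nil (o : Option Char → Char → List Char) (p : Option Char) : pwGo o p [] = [] := rfl
theorem pwGo_cons (o : Option Char → Char → List Char) (p : Option Char) (x : Char) (l : List Char) :
    pwGo o p (x :: l) = o p x ++ pwGo o (some x) l := rfl

-- pwGo only looks at the incoming prev through the first block
theorem pwGo_head_congr (o : Option Char → Char → List Char) (p q : Option Char) (l : List Char)
    (h : ∀ y, l.head? = some y → o p y = o q y) : pwGo o p l = pwGo o q l := by
  cases l with
  | nil => rfl
  | cons x rest => simp [pwGo_cons, h x rfl]

theorem pwGo_append (o : Option Char → Char → List Char) (b rest : List Char) (q : Option Char)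
    (u : Char) (h : b.getLast? = some u) :
    pwGo o q (b ++ rest) = pwGo o q b ++ pwGo o (some u) rest := by
  induction b generalizing q with
  | nil => simp at h
  | cons x b' ih =>
    cases b' with
    | nil => simp at h; subst h; simp [pwGo_cons, pwGo_nil]
    | cons z b'' =>
      rw [List.cons_append, pwGo_cons, pwGo_cons, ih (some x) (by simpa using h), List.append_assoc]

-- go-equations of PySem.Chars.replace
theorem go_zero (old new l acc : List Char) :
    PySem.Chars.replace.go old new 0 l acc = acc.reverse ++ l := by
  cases l <;> rfl
theorem go_succ_nil (old new acc : List Char) (n : Nat) :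
    PySem.Chars.replace.go old new (n+1) [] acc = acc.reverse := rfl
theorem go_succ_cons (old new acc : List Char) (n : Nat) (c : Char) (t : List Char) :
    PySem.Chars.replace.go old new (n+1) (c :: t) acc =
      if old.isPrefixOf (c :: t) then
        PySem.Chars.replace.go old new n (List.drop old.length (c :: t)) (new.reverse ++ acc)
      else PySem.Chars.replace.go old new n t (c :: acc) := rfl
theorem go_eq (a b : Char) (t : List Char) (hab : a ≠ b) :
    ∀ (fuel : Nat) (l acc : List Char), l.length ≤ fuel →
      PySem.Chars.replace.go [a, b] (a :: t) fuel l acc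
        = acc.reverse ++ pwGo (ruleOut [⟨a, b, t⟩]) none l := by
  intro fuel
  induction fuel using Nat.strong_induction_on with
  | _ fuel ih =>
    intro l acc hlen
    cases fuel with
    | zero =>
      have : l = [] := by cases l <;> simp_all
      subst this; simp [go_zero, pwGo_nil]
    | succ fuel =>
      cases l with
      | nil => simp [go_succ_nil, pwGo_nil]
      | cons c rest =>
        rw [go_succ_cons]
        by_cases hpre : List.isPrefixOf [a, b] (c :: rest)
        · cases rest with
          | nil => simp [List.isPrefixOf] at hpre
          | cons b' rest' =>
            have hc : a = c ∧ b = b' := by simpa [List.isPrefixOf] using hpre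
            obtain ⟨hc, hb'⟩ := hc; subst hc; subst hb'
            rw [if_pos hpre]
            simp only [List.length_cons] at hlen
            have hdrop : List.drop [a, b].length (a :: b :: rest') = rest' := by simp
            rw [hdrop, ih fuel (by omega) rest' _ (by omega)]
            rw [pwGo_cons, pwGo_cons]
            have h1 : ruleOut [⟨a, b, t⟩] none a = [a] := by simp [ruleOut_cons, ruleOut]
            have h2 : ruleOut [⟨a, b, t⟩] (some a) b = t := by simp [ruleOut_cons]
            rw [h1, h2, pwGo_head_congr _ (some b) none rest'
                  (by intro y _; simp [ruleOut_cons, ruleOut, Ne.symm hab])]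
            simp
        · rw [if_neg hpre]
          simp only [List.length_cons] at hlen
          rw [ih fuel (by omega) rest _ (by omega)]
          have h1 : ruleOut [⟨a, b, t⟩] none c = [c] := by simp [ruleOut_cons, ruleOut]
          rw [pwGo_cons, h1]
          have : pwGo (ruleOut [⟨a, b, t⟩]) (some c) rest = pwGo (ruleOut [⟨a, b, t⟩]) none rest := by
            apply pwGo_head_congr
            intro y hy
            by_cases hca : c = a
            · subst hca
              have hyb : y ≠ b := by
                intro hyb; subst hyb
                cases rest with
                | nil => simp at hy
                | cons z rest'' =>
                  simp at hy; subst hy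
                  exact hpre (by simp [List.isPrefixOf])
              simp [ruleOut_cons, ruleOut, hyb]
            · simp [ruleOut_cons, ruleOut, hca]
          rw [this]; simp

theorem replace_pair (a b : Char) (t : List Char) (hab : a ≠ b) (l : List Char) :
    PySem.Chars.replace l [a, b] (a :: t) = pwGo (ruleOut [⟨a, b, t⟩]) none l := by
  rw [PySem.Chars.replace]
  simp only [List.isEmpty_cons, Bool.false_eq_true, if_false]
  rw [go_eq a b t hab l.length l [] le_rfl]
  simp
-- r2 never fires along out, whatever follows prev p
def noFireFrom (r2 : URule) : Option Char → List Char → Bool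
  | _, [] => true
  | p, x :: rest => !(decide (p = some r2.prev) && decide (x = r2.cur)) && noFireFrom r2 (some x) rest

-- block check: pwGo for rule r2 leaves out unchanged for ANY incoming prev
def okBlock (r2 : URule) (out : List Char) : Bool :=
  match out with
  | [] => false
  | x :: rest => decide (x ≠ r2.cur) && noFireFrom r2 (some x) rest

-- compatibility of an earlier rule r1 with a later pass r2
def ruleCompat (r1 r2 : URule) : Bool :=
  okBlock r2 r1.out &&
  (match r1.out.getLast? with
   | some u => decide ((u = r2.prev) ↔ (r1.cur = r2.prev))
   | none => false)

theorem pwGo_noFireFrom (r2 : URule) :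
    ∀ (out : List Char) (p : Option Char), noFireFrom r2 p out = true →
      pwGo (ruleOut [r2]) p out = out := by
  intro out
  induction out with
  | nil => intro p _; rfl
  | cons x rest ih =>
    intro p h
    simp only [noFireFrom, Bool.and_eq_true, Bool.not_eq_true', Bool.and_eq_false_iff,
      decide_eq_false_iff_not, Bool.not_eq_true, decide_eq_true_eq] at h
    rw [pwGo_cons, ih (some x) h.2, ruleOut_cons]
    have : ¬(p = some r2.prev ∧ x = r2.cur) := by
      rcases h.1 with h' | h' <;> intro hc <;> simp_all
    rw [if_neg this]; rfl

theorem pwGo_okBlock (r2 : URule) (out : List Char) (q : Option Char)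
    (h : okBlock r2 out = true) : pwGo (ruleOut [r2]) q out = out := by
  cases out with
  | nil => rfl
  | cons x rest =>
    simp only [okBlock, Bool.and_eq_true, decide_eq_true_eq] at h
    rw [pwGo_cons, pwGo_noFireFrom r2 rest (some x) h.2, ruleOut_cons,
      if_neg (by intro hc; exact h.1 hc.2)]
    rfl

theorem ruleOut_single_congr (r2 : URule) (u v : Char) (h : (u = r2.prev) ↔ (v = r2.prev)) :
    ∀ y, ruleOut [r2] (some u) y = ruleOut [r2] (some v) y := by
  intro y
  simp only [ruleOut_cons]
  by_cases hu : u = r2.prev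
  · rw [h] at hu; simp_all
  · have hv : ¬ v = r2.prev := fun hv => hu (h.mpr hv)
    simp [hu, hv, ruleOut]

theorem ruleOut_ne_nil (rs : List URule) (h : ∀ r ∈ rs, r.out ≠ []) :
    ∀ p x, ruleOut rs p x ≠ [] := by
  intro p x
  induction rs with
  | nil => simp [ruleOut]
  | cons r rest ih =>
    rw [ruleOut_cons]
    split_ifs with hf
    · exact h r (by simp)
    · exact ih (fun r' hr' => h r' (by simp [hr']))
-- the generic fusion lemma: one more replace pass over an already-fused pipeline
theorem fuse (o1 : Option Char → Char → List Char) (r2 : URule)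
    (o12 : Option Char → Char → List Char)
    (hne : ∀ p x, o1 p x ≠ [])
    (hblock : ∀ p q x, (∀ y, ruleOut [r2] q y = ruleOut [r2] p y) →
        pwGo (ruleOut [r2]) q (o1 p x) = o12 p x)
    (hlast : ∀ p x u, (o1 p x).getLast? = some u →
        ∀ y, ruleOut [r2] (some u) y = ruleOut [r2] (some x) y) :
    ∀ (l : List Char) (p q : Option Char), (∀ y, ruleOut [r2] q y = ruleOut [r2] p y) →
      pwGo (ruleOut [r2]) q (pwGo o1 p l) = pwGo o12 p l := by
  intro l
  induction l with
  | nil => intro p q _; rfl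
  | cons x rest ih =>
    intro p q hq
    obtain ⟨u, hu⟩ : ∃ u, (o1 p x).getLast? = some u := by
      cases hgl : (o1 p x).getLast? with
      | none => exact absurd (List.getLast?_eq_none_iff.mp hgl) (hne p x)
      | some u => exact ⟨u, rfl⟩
    rw [pwGo_cons, pwGo_append _ _ _ _ u hu, hblock p q x hq, pwGo_cons,
      ih (some x) (some u) (hlast p x u hu)]

theorem hblock_of (rs : List URule) (r2 : URule) (hQ : ∀ r ∈ rs, ruleCompat r r2 = true) :
    ∀ p q x, (∀ y, ruleOut [r2] q y = ruleOut [r2] p y) →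
      pwGo (ruleOut [r2]) q (ruleOut rs p x) = ruleOut (rs ++ [r2]) p x := by
  induction rs with
  | nil =>
    intro p q x hq
    show pwGo (ruleOut [r2]) q [x] = _
    rw [pwGo_cons, pwGo_nil, List.append_nil, hq x]; rfl
  | cons r rest ih =>
    intro p q x hq
    rw [ruleOut_cons, List.cons_append, ruleOut_cons]
    split_ifs with hf
    · have := hQ r (by simp)
      simp only [ruleCompat, Bool.and_eq_true] at this
      exact pwGo_okBlock r2 r.out q this.1
    · exact ih (fun r' hr' => hQ r' (by simp [hr'])) p q x hq

theorem hlast_of (rs : List URule) (r2 : URule) (hQ : ∀ r ∈ rs, ruleCompat r r2 = true) :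
    ∀ p x u, (ruleOut rs p x).getLast? = some u →
      ∀ y, ruleOut [r2] (some u) y = ruleOut [r2] (some x) y := by
  induction rs with
  | nil =>
    intro p x u hu
    have hx : x = u := by simpa [ruleOut] using hu
    subst hx; exact fun y => rfl
  | cons r rest ih =>
    intro p x u hu
    rw [ruleOut_cons] at hu
    split_ifs at hu with hf
    · have hc := hQ r (by simp)
      simp only [ruleCompat, Bool.and_eq_true] at hc
      have hlast := hc.2
      rw [hu] at hlast
      simp only [decide_eq_true_eq] at hlast
      exact fun y => (ruleOut_single_congr r2 u x (by rw [hlast, hf.2])) y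
    · exact ih (fun r' hr' => hQ r' (by simp [hr'])) p x u hu
def GoodRules (rs : List URule) : Prop :=
  rs.Pairwise (fun r1 r2 => ruleCompat r1 r2 = true) ∧ ∀ r ∈ rs, r.prev ≠ r.cur ∧ r.out ≠ []

theorem pwGo_default (l : List Char) : ∀ p, pwGo (ruleOut []) p l = l := by
  induction l with
  | nil => intro p; rfl
  | cons x rest ih => intro p; rw [pwGo_cons, ih (some x)]; rfl

theorem applyRules_eq (rs : List URule) (h : GoodRules rs) :
    ∀ l, applyRules rs l = pwGo (ruleOut rs) none l := by
  induction rs using List.reverseRecOn with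
  | nil => intro l; rw [pwGo_default]; rfl
  | append_singleton rs r ih =>
    obtain ⟨hpw, hel⟩ := h
    rw [List.pairwise_append] at hpw
    have hgood : GoodRules rs := ⟨hpw.1, fun r' hr' => hel r' (by simp [hr'])⟩ 
    have hQ : ∀ r' ∈ rs, ruleCompat r' r = true := fun r' hr' =>
      hpw.2.2 r' hr' r (by simp)
    intro l
    have hr := hel r (by simp)
    rw [applyRules, List.foldl_append]
    have : List.foldl (fun l r => PySem.Chars.replace l [r.prev, r.cur] (r.prev :: r.out)) l rs
        = applyRules rs l := rfl
    rw [this, ih hgood, List.foldl_cons, List.foldl_nil]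
    have heta : (⟨r.prev, r.cur, r.out⟩ : URule) = r := rfl
    rw [replace_pair r.prev r.cur r.out hr.1 _, heta]
    exact fuse (ruleOut rs) r (ruleOut (rs ++ [r]))
      (ruleOut_ne_nil rs (fun r' hr' => (hel r' (by simp [hr'])).2))
      (hblock_of rs r hQ) (hlast_of rs r hQ) _ none none (fun y => rfl)
theorem goodRules_uwu : GoodRules uwuRules := by
  constructor
  · decide
  · decide

theorem uwuify_alt_eq_applyRules (text : String) :
    uwuify_alt text = String.ofList ((applyRules uwuRules text.toList).map uwuifyTranslate) := by
  simp only [uwuify_alt, applyRules, uwuRules, List.foldl_cons, List.foldl_nil]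
  simp only [PySem.Str.toList_replace]
  congr 1
theorem uwuify_alt_eq_pwGo' (text : String) :
    uwuify_alt text =
      String.ofList ((pwGo (ruleOut uwuRules) none text.toList).map uwuifyTranslate) := by
  rw [uwuify_alt_eq_applyRules, applyRules_eq uwuRules goodRules_uwu]

def prevAt (cs : List Char) (k : Nat) : Option Char :=
  if k = 0 then none else cs[k-1]?

theorem ofList_singleton_eq_iff (c : Char) (s : String) :
    (String.ofList [c] = s) ↔ [c] = s.toList := by
  constructor
  · intro h; rw [← h, String.toList_ofList]
  · intro h; have := congrArg String.ofList h; simpa using this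
theorem oflit_76 (c : Char) : (String.ofList [c] = "L") ↔ c = 'L' := by
  rw [ofList_singleton_eq_iff]; simp
theorem oflit_82 (c : Char) : (String.ofList [c] = "R") ↔ c = 'R' := by
  rw [ofList_singleton_eq_iff]; simp
theorem oflit_108 (c : Char) : (String.ofList [c] = "l") ↔ c = 'l' := by
  rw [ofList_singleton_eq_iff]; simp
theorem oflit_114 (c : Char) : (String.ofList [c] = "r") ↔ c = 'r' := by
  rw [ofList_singleton_eq_iff]; simp
theorem oflit_65 (c : Char) : (String.ofList [c] = "A") ↔ c = 'A' := by
  rw [ofList_singleton_eq_iff]; simp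
theorem oflit_69 (c : Char) : (String.ofList [c] = "E") ↔ c = 'E' := by
  rw [ofList_singleton_eq_iff]; simp
theorem oflit_73 (c : Char) : (String.ofList [c] = "I") ↔ c = 'I' := by
  rw [ofList_singleton_eq_iff]; simp
theorem oflit_79 (c : Char) : (String.ofList [c] = "O") ↔ c = 'O' := by
  rw [ofList_singleton_eq_iff]; simp
theorem oflit_85 (c : Char) : (String.ofList [c] = "U") ↔ c = 'U' := by
  rw [ofList_singleton_eq_iff]; simp
theorem oflit_97 (c : Char) : (String.ofList [c] = "a") ↔ c = 'a' := by
  rw [ofList_singleton_eq_iff]; simp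
theorem oflit_101 (c : Char) : (String.ofList [c] = "e") ↔ c = 'e' := by
  rw [ofList_singleton_eq_iff]; simp
theorem oflit_105 (c : Char) : (String.ofList [c] = "i") ↔ c = 'i' := by
  rw [ofList_singleton_eq_iff]; simp
theorem oflit_111 (c : Char) : (String.ofList [c] = "o") ↔ c = 'o' := by
  rw [ofList_singleton_eq_iff]; simp
theorem oflit_117 (c : Char) : (String.ofList [c] = "u") ↔ c = 'u' := by
  rw [ofList_singleton_eq_iff]; simp
theorem oflit_78 (c : Char) : (String.ofList [c] = "N") ↔ c = 'N' := by
  rw [ofList_singleton_eq_iff]; simp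
theorem oflit_77 (c : Char) : (String.ofList [c] = "M") ↔ c = 'M' := by
  rw [ofList_singleton_eq_iff]; simp
theorem oflit_110 (c : Char) : (String.ofList [c] = "n") ↔ c = 'n' := by
  rw [ofList_singleton_eq_iff]; simp
theorem oflit_109 (c : Char) : (String.ofList [c] = "m") ↔ c = 'm' := by
  rw [ofList_singleton_eq_iff]; simp
theorem oflit_83 (c : Char) : (String.ofList [c] = "S") ↔ c = 'S' := by
  rw [ofList_singleton_eq_iff]; simp
theorem oflit_115 (c : Char) : (String.ofList [c] = "s") ↔ c = 's' := by
  rw [ofList_singleton_eq_iff]; simp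
theorem oflit_OVE (c : Char) : (String.ofList [c] = "OVE") ↔ False := by
  rw [ofList_singleton_eq_iff]; simp
theorem oflit_ove (c : Char) : (String.ofList [c] = "ove") ↔ False := by
  rw [ofList_singleton_eq_iff]; simp
theorem sent_78 : (("q!1u&7u&7p)0q!1e#3" : String) = "N") ↔ False := by decide
theorem sent_77 : (("q!1u&7u&7p)0q!1e#3" : String) = "M") ↔ False := by decide
theorem sent_110 : (("q!1u&7u&7p)0q!1e#3" : String) = "n") ↔ False := by decide
theorem sent_109 : (("q!1u&7u&7p)0q!1e#3" : String) = "m") ↔ False := by decide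
theorem sent_73 : (("q!1u&7u&7p)0q!1e#3" : String) = "I") ↔ False := by decide
theorem sent_105 : (("q!1u&7u&7p)0q!1e#3" : String) = "i") ↔ False := by decide
theorem append_ite (P : Prop) [Decidable P] (a b c : List Char) :
    a ++ (if P then b else c) = if P then a ++ b else a ++ c := by split_ifs <;> rfl

set_option maxHeartbeats 1000000 in
theorem uwuifyStep_eq (text : String) (acc : List Char) (k : Nat) (hk : k < text.toList.length) :
    uwuifyStep text acc (k : Int) = acc ++ oA (prevAt text.toList k) (text.toList[k]'hk) := by
  rcases Nat.eq_zero_or_pos k with hk0 | hk0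
  · subst hk0
    have hget0 : PySem.Str.pyGet? text (0 : Int) = some (text.toList[0]'hk) := by
      simp [PySem.List.pyGet?_zero, List.getElem?_eq_getElem hk]
    simp only [uwuifyStep, Nat.cast_zero, hget0, Option.elim, gt_iff_lt, lt_self_iff_false,
      if_false, oA, prevAt, if_pos rfl,
      oflit_76, oflit_82, oflit_108, oflit_114, oflit_65, oflit_69, oflit_73, oflit_79, oflit_85, oflit_97, oflit_101, oflit_105, oflit_111, oflit_117, oflit_78, oflit_77, oflit_110, oflit_109, oflit_83, oflit_115, oflit_OVE, oflit_ove,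
      sent_78, sent_77, sent_110, sent_109, sent_73, sent_105,
      List.mem_cons, List.not_mem_nil, or_false, or_self, false_or,
      String.toList_ofList, append_ite, iff_false, if_false, if_true, ite_true, ite_false,
      List.append_assoc, List.singleton_append, List.cons_append, List.nil_append, reduceCtorEq]
  · have hk1 : k - 1 < text.toList.length := by omega
    have hget : PySem.Str.pyGet? text (k : Int) = some (text.toList[k]'hk) := by
      simp [List.getElem?_eq_getElem hk]
    have hgetp : PySem.Str.pyGet? text ((k : Int) - 1) = some (text.toList[k-1]'hk1) := by
      have h2 : (k : Int) - 1 = ((k - 1 : Nat) : Int) := by omega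
      rw [h2]
      simp [List.getElem?_eq_getElem hk1]
    have hp : text.toList[k-1]? = some (text.toList[k-1]'hk1) := List.getElem?_eq_getElem hk1
    simp only [uwuifyStep, hget, hgetp, Option.elim, oA, prevAt, gt_iff_lt,
      if_pos (by exact_mod_cast hk0 : (0:Int) < (k:Int)),
      if_neg (by omega : ¬ k = 0), hp, Option.some_inj,
      oflit_76, oflit_82, oflit_108, oflit_114, oflit_65, oflit_69, oflit_73, oflit_79, oflit_85, oflit_97, oflit_101, oflit_105, oflit_111, oflit_117, oflit_78, oflit_77, oflit_110, oflit_109, oflit_83, oflit_115, oflit_OVE, oflit_ove,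
      List.mem_cons, List.not_mem_nil, or_false, or_self, false_or,
      String.toList_ofList, append_ite, iff_false, if_false, if_true, ite_true, ite_false,
      List.append_assoc, List.singleton_append, List.cons_append, List.nil_append, reduceCtorEq]

theorem uwuify_loop (text : String) :
    ∀ (m k : Nat) (acc : List Char), text.toList.length = k + m →
      (PySem.List.pyRange (k : Int) (text.toList.length : Int) 1).foldl (uwuifyStep text) acc
        = acc ++ pwGo oA (prevAt text.toList k) (text.toList.drop k) := by
  intro m
  induction m with
  | zero =>
    intro k acc hk
    have h1 : PySem.List.pyRange (k : Int) (text.toList.length : Int) 1 = [] :=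
      PySem.List.pyRange_one_eq_nil (by omega)
    rw [h1, List.foldl_nil, List.drop_of_length_le (by omega), pwGo_nil, List.append_nil]
  | succ m ih =>
    intro k acc hk
    have hklt : k < text.toList.length := by omega
    rw [PySem.List.pyRange_one_cons (by exact_mod_cast hklt), List.foldl_cons]
    have hcast : (k : Int) + 1 = ((k + 1 : Nat) : Int) := by push_cast; ring
    rw [hcast, ih (k+1) _ (by omega), uwuifyStep_eq text acc k hklt]
    rw [List.drop_eq_getElem_cons hklt, pwGo_cons]
    have hprev : prevAt text.toList (k+1) = some (text.toList[k]'hklt) := by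
      simp [prevAt]
    rw [hprev, List.append_assoc]

theorem uwuify_eq_pwGo' (text : String) :
    uwuify text = String.ofList (pwGo oA none text.toList) := by
  show String.ofList ((PySem.List.pyRange 0 (PySem.Str.len text) 1).foldl (uwuifyStep text) []) = _
  have hlen : PySem.Str.len text = (text.toList.length : Int) := by
    simp [PySem.Str.len_eq]
  rw [hlen]
  have := uwuify_loop text text.toList.length 0 [] (by omega)
  simp only [Nat.cast_zero] at this
  rw [this]
  simp [prevAt]

set_option maxHeartbeats 2000000 in
theorem map_translate_ruleOut (p : Option Char) (x : Char) :
    (ruleOut uwuRules p x).map uwuifyTranslate = oA p x := by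
  by_cases h0 : x = 'A'
  · subst h0
    simp only [uwuRules, ruleOut_cons, Char.reduceEq, and_true, and_false, if_false]
    simp only [oA, Char.reduceEq, List.mem_cons, List.not_mem_nil, or_false, false_or, if_true, if_false, or_true, true_or, ite_true, ite_false]
    first | (split_ifs <;> (first | tauto | simp [ruleOut, uwuifyTranslate])) | simp [ruleOut, uwuifyTranslate]
  by_cases h1 : x = 'E'
  · subst h1
    simp only [uwuRules, ruleOut_cons, Char.reduceEq, and_true, and_false, if_false]
    simp only [oA, Char.reduceEq, List.mem_cons, List.not_mem_nil, or_false, false_or, if_true, if_false, or_true, true_or, ite_true, ite_false]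
    first | (split_ifs <;> (first | tauto | simp [ruleOut, uwuifyTranslate])) | simp [ruleOut, uwuifyTranslate]
  by_cases h2 : x = 'I'
  · subst h2
    simp only [uwuRules, ruleOut_cons, Char.reduceEq, and_true, and_false, if_false]
    simp only [oA, Char.reduceEq, List.mem_cons, List.not_mem_nil, or_false, false_or, if_true, if_false, or_true, true_or, ite_true, ite_false]
    first | (split_ifs <;> (first | tauto | simp [ruleOut, uwuifyTranslate])) | simp [ruleOut, uwuifyTranslate]
  by_cases h3 : x = 'O'
  · subst h3
    simp only [uwuRules, ruleOut_cons, Char.reduceEq, and_true, and_false, if_false]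
    simp only [oA, Char.reduceEq, List.mem_cons, List.not_mem_nil, or_false, false_or, if_true, if_false, or_true, true_or, ite_true, ite_false]
    first | (split_ifs <;> (first | tauto | simp [ruleOut, uwuifyTranslate])) | simp [ruleOut, uwuifyTranslate]
  by_cases h4 : x = 'U'
  · subst h4
    simp only [uwuRules, ruleOut_cons, Char.reduceEq, and_true, and_false, if_false]
    simp only [oA, Char.reduceEq, List.mem_cons, List.not_mem_nil, or_false, false_or, if_true, if_false, or_true, true_or, ite_true, ite_false]
    first | (split_ifs <;> (first | tauto | simp [ruleOut, uwuifyTranslate])) | simp [ruleOut, uwuifyTranslate]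
  by_cases h5 : x = 'a'
  · subst h5
    simp only [uwuRules, ruleOut_cons, Char.reduceEq, and_true, and_false, if_false]
    simp only [oA, Char.reduceEq, List.mem_cons, List.not_mem_nil, or_false, false_or, if_true, if_false, or_true, true_or, ite_true, ite_false]
    first | (split_ifs <;> (first | tauto | simp [ruleOut, uwuifyTranslate])) | simp [ruleOut, uwuifyTranslate]
  by_cases h6 : x = 'e'
  · subst h6
    simp only [uwuRules, ruleOut_cons, Char.reduceEq, and_true, and_false, if_false]
    simp only [oA, Char.reduceEq, List.mem_cons, List.not_mem_nil, or_false, false_or, if_true, if_false, or_true, true_or, ite_true, ite_false]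
    first | (split_ifs <;> (first | tauto | simp [ruleOut, uwuifyTranslate])) | simp [ruleOut, uwuifyTranslate]
  by_cases h7 : x = 'i'
  · subst h7
    simp only [uwuRules, ruleOut_cons, Char.reduceEq, and_true, and_false, if_false]
    simp only [oA, Char.reduceEq, List.mem_cons, List.not_mem_nil, or_false, false_or, if_true, if_false, or_true, true_or, ite_true, ite_false]
    first | (split_ifs <;> (first | tauto | simp [ruleOut, uwuifyTranslate])) | simp [ruleOut, uwuifyTranslate]
  by_cases h8 : x = 'o'
  · subst h8
    simp only [uwuRules, ruleOut_cons, Char.reduceEq, and_true, and_false, if_false]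
    simp only [oA, Char.reduceEq, List.mem_cons, List.not_mem_nil, or_false, false_or, if_true, if_false, or_true, true_or, ite_true, ite_false]
    first | (split_ifs <;> (first | tauto | simp [ruleOut, uwuifyTranslate])) | simp [ruleOut, uwuifyTranslate]
  by_cases h9 : x = 'u'
  · subst h9
    simp only [uwuRules, ruleOut_cons, Char.reduceEq, and_true, and_false, if_false]
    simp only [oA, Char.reduceEq, List.mem_cons, List.not_mem_nil, or_false, false_or, if_true, if_false, or_true, true_or, ite_true, ite_false]
    first | (split_ifs <;> (first | tauto | simp [ruleOut, uwuifyTranslate])) | simp [ruleOut, uwuifyTranslate]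
  by_cases h10 : x = 'S'
  · subst h10
    simp only [uwuRules, ruleOut_cons, Char.reduceEq, and_true, and_false, if_false]
    simp only [oA, Char.reduceEq, List.mem_cons, List.not_mem_nil, or_false, false_or, if_true, if_false, or_true, true_or, ite_true, ite_false]
    first | (split_ifs <;> (first | tauto | simp [ruleOut, uwuifyTranslate])) | simp [ruleOut, uwuifyTranslate]
  by_cases h11 : x = 's'
  · subst h11
    simp only [uwuRules, ruleOut_cons, Char.reduceEq, and_true, and_false, if_false]
    simp only [oA, Char.reduceEq, List.mem_cons, List.not_mem_nil, or_false, false_or, if_true, if_false, or_true, true_or, ite_true, ite_false]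
    first | (split_ifs <;> (first | tauto | simp [ruleOut, uwuifyTranslate])) | simp [ruleOut, uwuifyTranslate]
  by_cases h12 : x = 'L'
  · subst h12
    simp only [uwuRules, ruleOut_cons, Char.reduceEq, and_true, and_false, if_false]
    simp only [oA, Char.reduceEq, List.mem_cons, List.not_mem_nil, or_false, false_or, if_true, if_false, or_true, true_or, ite_true, ite_false]
    first | (split_ifs <;> (first | tauto | simp [ruleOut, uwuifyTranslate])) | simp [ruleOut, uwuifyTranslate]
  by_cases h13 : x = 'R'
  · subst h13
    simp only [uwuRules, ruleOut_cons, Char.reduceEq, and_true, and_false, if_false]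
    simp only [oA, Char.reduceEq, List.mem_cons, List.not_mem_nil, or_false, false_or, if_true, if_false, or_true, true_or, ite_true, ite_false]
    first | (split_ifs <;> (first | tauto | simp [ruleOut, uwuifyTranslate])) | simp [ruleOut, uwuifyTranslate]
  by_cases h14 : x = 'l'
  · subst h14
    simp only [uwuRules, ruleOut_cons, Char.reduceEq, and_true, and_false, if_false]
    simp only [oA, Char.reduceEq, List.mem_cons, List.not_mem_nil, or_false, false_or, if_true, if_false, or_true, true_or, ite_true, ite_false]
    first | (split_ifs <;> (first | tauto | simp [ruleOut, uwuifyTranslate])) | simp [ruleOut, uwuifyTranslate]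
  by_cases h15 : x = 'r'
  · subst h15
    simp only [uwuRules, ruleOut_cons, Char.reduceEq, and_true, and_false, if_false]
    simp only [oA, Char.reduceEq, List.mem_cons, List.not_mem_nil, or_false, false_or, if_true, if_false, or_true, true_or, ite_true, ite_false]
    first | (split_ifs <;> (first | tauto | simp [ruleOut, uwuifyTranslate])) | simp [ruleOut, uwuifyTranslate]
  simp only [uwuRules, ruleOut_cons, oA, h0, h1, h2, h3, h4, h5, h6, h7, h8, h9, h10, h11, h12, h13, h14, h15, and_false, if_false, ite_false, List.mem_cons, List.not_mem_nil, or_self, or_false, false_or]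
  simp [ruleOut, uwuifyTranslate, h0, h1, h2, h3, h4, h5, h6, h7, h8, h9, h10, h11, h12, h13, h14, h15]

theorem pwGo_map (o : Option Char → Char → List Char) (f : Char → Char) :
    ∀ (l : List Char) (p : Option Char),
      (pwGo o p l).map f = pwGo (fun p x => (o p x).map f) p l := by
  intro l
  induction l with
  | nil => intro p; simp [pwGo]
  | cons x rest ih => intro p; simp [pwGo, ih]

-- ===== VERDICT (by name: the statement is the Claim_ definition above) =====
theorem uwuify_spec : Claim_equal_uwuify := by
  intro text _
  unfold Spec_uwuify
  rw [uwuify_eq_pwGo', uwuify_alt_eq_pwGo']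
  congr 1
  rw [pwGo_map]
  have : (fun p x => (ruleOut uwuRules p x).map uwuifyTranslate) = oA := by
    funext p x; exact map_translate_ruleOut p x
  rw [this]
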